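-- pv_equiv track=rewrite | github.com/Jessitoii/war-assets-3d | scripts/find_missing_specs.py | check_missing
-- ===== SOURCE A (Python) =====
-- def check_missing(asset):
--     short_specs = asset.get("short_specs", {})
--
--     # Speed keys
--     speed_keys = [
--         k for k in short_specs.keys() if "speed" in k.lower() or "hiz" in k.lower()
--     ]
--     # Range keys
--     range_keys = [
--         k for k in short_specs.keys() if "range" in k.lower() or "menzil" in k.lower()
--     ]
--     # Generation keys
--     gen_keys = [
--         k
--         for k in short_specs.keys()
--         if "generation" in k.lower() or "nesil" in k.lower()
--     ]
--
--     missing = []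
--     if not speed_keys:
--         missing.append("speed")
--     if not range_keys:
--         missing.append("range")
--     if not gen_keys:
--         missing.append("generation")
--
--     return missing
-- ===== SOURCE B (Python) =====
-- def check_missing(asset):
--     short_specs = asset.get("short_specs", {})
--
--     speed = rng = gen = False
--     # Single pass over the keys: lowercase each key once, set three flags,
--     # and stop early once all three categories are covered.
--     for k in short_specs.keys():
--         kl = k.lower()
--         speed = speed or "speed" in kl or "hiz" in kl
--         rng = rng or "range" in kl or "menzil" in kl
--         gen = gen or "generation" in kl or "nesil" in kl
--         if speed and rng and gen:
--             break
--
--     missing = []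
--     if not speed:
--         missing.append("speed")
--     if not rng:
--         missing.append("range")
--     if not gen:
--         missing.append("generation")
--     return missing
-- ===== Notes on version B (the rewrite author's own statement) =====
-- stated objective: simpler
-- what changed: Replaces three separate comprehension scans over the keys (each lowercasing every key twice) with one combined pass that lowercases each key once, maintains three boolean flags and breaks early when all three are set.
import Mathlib
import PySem

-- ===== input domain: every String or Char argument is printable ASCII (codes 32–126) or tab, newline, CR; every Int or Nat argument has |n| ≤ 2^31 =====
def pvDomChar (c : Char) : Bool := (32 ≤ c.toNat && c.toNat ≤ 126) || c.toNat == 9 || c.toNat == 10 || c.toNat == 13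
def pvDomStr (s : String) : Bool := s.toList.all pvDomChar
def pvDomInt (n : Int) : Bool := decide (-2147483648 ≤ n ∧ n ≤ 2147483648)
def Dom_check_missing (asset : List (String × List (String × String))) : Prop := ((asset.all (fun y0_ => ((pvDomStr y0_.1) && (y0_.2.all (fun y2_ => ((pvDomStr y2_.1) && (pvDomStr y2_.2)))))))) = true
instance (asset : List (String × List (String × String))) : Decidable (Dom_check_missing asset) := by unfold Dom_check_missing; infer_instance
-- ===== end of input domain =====

-- One honest line: B makes a single pass over the keys with three boolean flags
-- (one lowercasing per key, early break) instead of A's three separate scans; objective: simpler.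

-- ===== PORT A =====
def check_missing (asset : List (String × List (String × String))) : List String :=
  let short_specs := (PySem.Dict.mk asset).getD "short_specs" []
  let ks := (PySem.Dict.mk short_specs).keys
  let speed_keys := ks.filter (fun k =>
    PySem.Str.isIn "speed" (PySem.Str.lower k) || PySem.Str.isIn "hiz" (PySem.Str.lower k))
  let range_keys := ks.filter (fun k =>
    PySem.Str.isIn "range" (PySem.Str.lower k) || PySem.Str.isIn "menzil" (PySem.Str.lower k))
  let gen_keys := ks.filter (fun k =>
    PySem.Str.isIn "generation" (PySem.Str.lower k) || PySem.Str.isIn "nesil" (PySem.Str.lower k))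
  let missing : List String := []
  let missing := if speed_keys.isEmpty then missing ++ ["speed"] else missing
  let missing := if range_keys.isEmpty then missing ++ ["range"] else missing
  let missing := if gen_keys.isEmpty then missing ++ ["generation"] else missing
  missing

-- ===== PORT B =====
-- the single-pass flag loop of Source B (early break when all three flags are set)
def scanFlags : List String → Bool → Bool → Bool → Bool × Bool × Bool
  | [], s, r, g => (s, r, g)
  | k :: ks, s, r, g =>
    let kl := PySem.Str.lower k
    let s := s || PySem.Str.isIn "speed" kl || PySem.Str.isIn "hiz" kl
    let r := r || PySem.Str.isIn "range" kl || PySem.Str.isIn "menzil" kl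
    let g := g || PySem.Str.isIn "generation" kl || PySem.Str.isIn "nesil" kl
    if s && r && g then (s, r, g) else scanFlags ks s r g

def check_missing_alt (asset : List (String × List (String × String))) : List String :=
  let short_specs := (PySem.Dict.mk asset).getD "short_specs" []
  let flags := scanFlags (PySem.Dict.mk short_specs).keys false false false
  let missing : List String := []
  let missing := if !flags.1 then missing ++ ["speed"] else missing
  let missing := if !flags.2.1 then missing ++ ["range"] else missing
  let missing := if !flags.2.2 then missing ++ ["generation"] else missing
  missing

-- ===== PRECONDITION & SPEC =====
def Spec_check_missing (asset : List (String × List (String × String))) (out : List String) : Prop := out = check_missing_alt asset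
instance (asset : List (String × List (String × String))) (out : List String) : Decidable (Spec_check_missing asset out) := by unfold Spec_check_missing; infer_instance

-- ===== CLAIM (what is proved, stated in full; the proofs are below) =====
def Claim_equal_check_missing : Prop := ∀ (asset : List (String × List (String × String))), Dom_check_missing asset → Spec_check_missing asset (check_missing asset)

-- ===== LEMMAS AND PROOFS =====
-- the flag loop computes the disjunction of each predicate over the keys
theorem scanFlags_eq (ks : List String) (s r g : Bool) :
    scanFlags ks s r g =
      (s || ks.any (fun k => PySem.Str.isIn "speed" (PySem.Str.lower k) || PySem.Str.isIn "hiz" (PySem.Str.lower k)),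
       r || ks.any (fun k => PySem.Str.isIn "range" (PySem.Str.lower k) || PySem.Str.isIn "menzil" (PySem.Str.lower k)),
       g || ks.any (fun k => PySem.Str.isIn "generation" (PySem.Str.lower k) || PySem.Str.isIn "nesil" (PySem.Str.lower k))) := by
  induction ks generalizing s r g with
  | nil => simp [scanFlags]
  | cons k ks ih =>
    simp only [scanFlags, List.any_cons]
    split
    · rename_i h
      simp only [Bool.and_eq_true] at h
      obtain ⟨⟨hs, hr⟩, hg⟩ := h
      simp only [← Bool.or_assoc] at hs hr hg ⊢
      simp only [hs, hr, hg]
      simp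
    · rw [ih]
      simp [Bool.or_assoc]

theorem filter_isEmpty_eq_not_any {α : Type} (p : α → Bool) (xs : List α) :
    (xs.filter p).isEmpty = !xs.any p := by
  induction xs with
  | nil => simp
  | cons x xs ih => by_cases h : p x <;> simp [h, ih]

-- ===== VERDICT (by name: the statement is the Claim_ definition above) =====
theorem check_missing_spec : Claim_equal_check_missing := by
  intro asset _
  unfold Spec_check_missing
  simp only [check_missing, check_missing_alt, scanFlags_eq, filter_isEmpty_eq_not_any,
    Bool.false_or]
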